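-- pv_equiv track=rewrite | github.com/masaers/adventofcode | 2023/13/run.py | mirrors
-- ===== SOURCE A (Python) =====
-- def mirrors(xs):
--     result = []
--     for i in range(1, len(xs)):
--         good = True
--         for sz in range(min(i, len(xs)-i)):
--             if xs[i-1-sz] != xs[i+sz]:
--                 good = False
--                 break
--         if good:
--             result.append(i)
--     return result
-- ===== SOURCE B (Python) =====
-- def mirrors(xs):
--     n = len(xs)
--     alive = list(range(1, n))
--     good = set()
--     for s in range(n // 2 + 1):
--         nxt = []
--         for i in alive:
--             if s >= min(i, n - i):
--                 good.add(i)
--             elif xs[i - 1 - s] == xs[i + s]: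
--                 nxt.append(i)
--         alive = nxt
--     return [i for i in range(1, n) if i in good]
-- ===== Notes on version B (the rewrite author's own statement) =====
-- stated objective: alternative
-- what changed: Instead of scanning each split point outward with an inner flag-and-break loop, B runs one synchronous outer loop over the mirror radius, maintaining a shrinking frontier of still-viable split points and a set of splits whose mirror reached a boundary, then emits the surviving splits with a final range scan.
import Mathlib
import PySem

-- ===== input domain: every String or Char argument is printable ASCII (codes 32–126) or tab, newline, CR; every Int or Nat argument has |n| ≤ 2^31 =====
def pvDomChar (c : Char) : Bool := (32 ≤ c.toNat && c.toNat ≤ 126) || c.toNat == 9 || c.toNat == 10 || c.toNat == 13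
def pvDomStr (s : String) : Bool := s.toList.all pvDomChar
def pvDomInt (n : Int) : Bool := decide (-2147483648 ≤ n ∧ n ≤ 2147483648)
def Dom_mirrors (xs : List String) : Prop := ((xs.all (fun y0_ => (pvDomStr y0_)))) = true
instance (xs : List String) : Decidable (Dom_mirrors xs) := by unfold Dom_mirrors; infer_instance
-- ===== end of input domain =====

-- B replaces A's per-split outward scan by one synchronous loop over the mirror radius that
-- maintains a shrinking frontier of viable splits and a set of boundary-reaching ones
-- (objective: alternative; same return value).

-- ===== PORT A =====
-- inner 'for sz in range(...)' loop with its early break ('good = False; break')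
def mirrorsLoopA (xs : List String) (i : Int) : List Int → Bool
  | [] => true
  | sz :: rest =>
    if PySem.List.pyGet? xs (i - 1 - sz) != PySem.List.pyGet? xs (i + sz) then false
    else mirrorsLoopA xs i rest

def mirrors (xs : List String) : List Int :=
  (PySem.List.pyRange 1 (xs.length : Int) 1).foldl
    (fun result i =>
      let good := mirrorsLoopA xs i (PySem.List.pyRange 0 (min i ((xs.length : Int) - i)) 1)
      if good then result ++ [i] else result) []

-- ===== PORT B =====
-- state = (alive frontier, good set); one round of the outer loop folds the body over 'alive'
def mirrors_alt (xs : List String) : List Int :=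
  let fin := (PySem.List.pyRange 0 (PySem.Int.floordiv (xs.length : Int) 2 + 1) 1).foldl
    (fun (st : List Int × PySem.Set Int) s =>
      st.1.foldl
        (fun (st2 : List Int × PySem.Set Int) i =>
          if s ≥ min i ((xs.length : Int) - i) then (st2.1, PySem.Set.add st2.2 i)
          else if PySem.List.pyGet? xs (i - 1 - s) == PySem.List.pyGet? xs (i + s) then
            (st2.1 ++ [i], st2.2)
          else st2)
        ([], st.2))
    (PySem.List.pyRange 1 (xs.length : Int) 1, PySem.Set.empty)
  (PySem.List.pyRange 1 (xs.length : Int) 1).filter (fun i => PySem.Set.contains fin.2 i)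

-- ===== PRECONDITION & SPEC =====
def Spec_mirrors (xs : List String) (out : List Int) : Prop := out = mirrors_alt xs
instance (xs : List String) (out : List Int) : Decidable (Spec_mirrors xs out) := by unfold Spec_mirrors; infer_instance

-- ===== CLAIM (what is proved, stated in full; the proofs are below) =====
def Claim_equal_mirrors : Prop := ∀ (xs : List String), Dom_mirrors xs → Spec_mirrors xs (mirrors xs)

-- ===== LEMMAS AND PROOFS =====

-- 'all comparisons with radius < k hold' (proof-side helper)
def okB (xs : List String) (i : Int) (k : Nat) : Bool :=
  (List.range k).all
    (fun sz => PySem.List.pyGet? xs (i - 1 - (sz : Int)) == PySem.List.pyGet? xs (i + (sz : Int)))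

-- the early-break loop is just 'all' of the pointwise comparison
lemma mirrorsLoopA_eq_all (xs : List String) (i : Int) (l : List Int) :
    mirrorsLoopA xs i l =
      l.all (fun sz => PySem.List.pyGet? xs (i - 1 - sz) == PySem.List.pyGet? xs (i + sz)) := by
  induction l with
  | nil => rfl
  | cons sz rest ih =>
    simp only [mirrorsLoopA, List.all_cons, ih, bne]
    cases PySem.List.pyGet? xs (i - 1 - sz) == PySem.List.pyGet? xs (i + sz) <;> simp

lemma okB_succ (xs : List String) (i : Int) (k : Nat) :
    okB xs i (k + 1) =
      (okB xs i k &&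
        (PySem.List.pyGet? xs (i - 1 - (k : Int)) == PySem.List.pyGet? xs (i + (k : Int)))) := by
  simp [okB, List.range_succ]

-- one round of B's outer loop, characterised: the new frontier and the new good set
lemma roundB_fst (xs : List String) (n s : Int) (l : List Int) (acc : List Int)
    (g : PySem.Set Int) :
    (l.foldl
      (fun (st2 : List Int × PySem.Set Int) i =>
        if s ≥ min i (n - i) then (st2.1, PySem.Set.add st2.2 i)
        else if PySem.List.pyGet? xs (i - 1 - s) == PySem.List.pyGet? xs (i + s) then
          (st2.1 ++ [i], st2.2)
        else st2)
      (acc, g)).1 =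
    acc ++ l.filter (fun i =>
      !(decide (s ≥ min i (n - i))) &&
        (PySem.List.pyGet? xs (i - 1 - s) == PySem.List.pyGet? xs (i + s))) := by
  induction l generalizing acc g with
  | nil => simp
  | cons i rest ih =>
    rw [List.foldl_cons]
    by_cases h : s ≥ min i (n - i)
    · rw [if_pos h, ih, List.filter_cons]
      have hp : (!decide (s ≥ min i (n - i)) &&
          (PySem.List.pyGet? xs (i - 1 - s) == PySem.List.pyGet? xs (i + s))) = false := by
        simp [h]
      rw [hp]
      simp
    · by_cases he : PySem.List.pyGet? xs (i - 1 - s) == PySem.List.pyGet? xs (i + s)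
      · rw [if_neg h, if_pos he, ih, List.filter_cons]
        have hp : (!decide (s ≥ min i (n - i)) &&
            (PySem.List.pyGet? xs (i - 1 - s) == PySem.List.pyGet? xs (i + s))) = true := by
          simp [h, he]
        rw [hp]
        simp
      · rw [if_neg h, if_neg (by simpa using he), ih, List.filter_cons]
        have hp : (!decide (s ≥ min i (n - i)) &&
            (PySem.List.pyGet? xs (i - 1 - s) == PySem.List.pyGet? xs (i + s))) = false := by
          simp [h, he]
        rw [hp]
        simp

lemma roundB_snd (xs : List String) (n s : Int) (l : List Int) (acc : List Int)
    (g : PySem.Set Int) (j : Int) :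
    (j ∈ (l.foldl
      (fun (st2 : List Int × PySem.Set Int) i =>
        if s ≥ min i (n - i) then (st2.1, PySem.Set.add st2.2 i)
        else if PySem.List.pyGet? xs (i - 1 - s) == PySem.List.pyGet? xs (i + s) then
          (st2.1 ++ [i], st2.2)
        else st2)
      (acc, g)).2) ↔ (j ∈ g ∨ (j ∈ l ∧ s ≥ min j (n - j))) := by
  induction l generalizing acc g with
  | nil => simp
  | cons i rest ih =>
    simp only [List.foldl_cons]
    by_cases h : s ≥ min i (n - i)
    · simp only [if_pos h, ih, PySem.Set.mem_add, List.mem_cons]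
      constructor
      · rintro ((hj | rfl) | hj)
        · exact Or.inl hj
        · exact Or.inr ⟨Or.inl rfl, h⟩
        · exact Or.inr ⟨Or.inr hj.1, hj.2⟩
      · rintro (hj | ⟨(rfl | hj), hs⟩)
        · exact Or.inl (Or.inl hj)
        · exact Or.inl (Or.inr rfl)
        · exact Or.inr ⟨hj, hs⟩
    · have hbody :
        (if s ≥ min i (n - i) then (acc, PySem.Set.add g i)
         else if PySem.List.pyGet? xs (i - 1 - s) == PySem.List.pyGet? xs (i + s) then
           (acc ++ [i], g)
         else (acc, g)).2 = g := by
        by_cases he : PySem.List.pyGet? xs (i - 1 - s) == PySem.List.pyGet? xs (i + s) <;>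
          simp [h, he]
      by_cases he : PySem.List.pyGet? xs (i - 1 - s) == PySem.List.pyGet? xs (i + s)
      · simp only [if_neg h, if_pos he, ih, List.mem_cons]
        constructor
        · rintro (hj | hj)
          · exact Or.inl hj
          · exact Or.inr ⟨Or.inr hj.1, hj.2⟩
        · rintro (hj | ⟨(rfl | hj), hs⟩)
          · exact Or.inl hj
          · exact absurd hs h
          · exact Or.inr ⟨hj, hs⟩
      · simp only [if_neg h, if_neg he, ih, List.mem_cons]
        constructor
        · rintro (hj | hj)
          · exact Or.inl hj
          · exact Or.inr ⟨Or.inr hj.1, hj.2⟩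
        · rintro (hj | ⟨(rfl | hj), hs⟩)
          · exact Or.inl hj
          · exact absurd hs h
          · exact Or.inr ⟨hj, hs⟩

-- invariant after K rounds of B's outer loop
lemma stateB_inv (xs : List String) (K : Nat) :
    (((List.range K).foldl
      (fun (st : List Int × PySem.Set Int) (s : Nat) =>
        st.1.foldl
          (fun (st2 : List Int × PySem.Set Int) i =>
            if (s : Int) ≥ min i ((xs.length : Int) - i) then (st2.1, PySem.Set.add st2.2 i)
            else if PySem.List.pyGet? xs (i - 1 - (s : Int)) ==
                PySem.List.pyGet? xs (i + (s : Int)) then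
              (st2.1 ++ [i], st2.2)
            else st2)
          ([], st.2))
      (PySem.List.pyRange 1 (xs.length : Int) 1, PySem.Set.empty)).1 =
      (PySem.List.pyRange 1 (xs.length : Int) 1).filter
        (fun i => decide ((K : Int) ≤ min i ((xs.length : Int) - i)) && okB xs i K)) ∧
    (∀ j, j ∈ ((List.range K).foldl
      (fun (st : List Int × PySem.Set Int) (s : Nat) =>
        st.1.foldl
          (fun (st2 : List Int × PySem.Set Int) i =>
            if (s : Int) ≥ min i ((xs.length : Int) - i) then (st2.1, PySem.Set.add st2.2 i)
            else if PySem.List.pyGet? xs (i - 1 - (s : Int)) ==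
                PySem.List.pyGet? xs (i + (s : Int)) then
              (st2.1 ++ [i], st2.2)
            else st2)
          ([], st.2))
      (PySem.List.pyRange 1 (xs.length : Int) 1, PySem.Set.empty)).2 ↔
      (j ∈ PySem.List.pyRange 1 (xs.length : Int) 1 ∧
        min j ((xs.length : Int) - j) < (K : Int) ∧
        okB xs j (min j ((xs.length : Int) - j)).toNat)) := by
  induction K with
  | zero =>
    constructor
    · rw [List.range_zero, List.foldl_nil]
      symm
      apply List.filter_eq_self.mpr
      intro i hi
      have := (PySem.List.mem_pyRange_one).mp hi
      simp [okB]
      omega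
    · intro j
      rw [List.range_zero, List.foldl_nil]
      constructor
      · intro hj
        exact absurd hj List.not_mem_nil
      · rintro ⟨hjr, hlt, -⟩
        have hb := (PySem.List.mem_pyRange_one).mp hjr
        rcases min_lt_iff.mp hlt with h | h <;> simp at h <;> omega
  | succ K ih =>
    rw [List.range_succ, List.foldl_append, List.foldl_cons, List.foldl_nil]
    obtain ⟨ih1, ih2⟩ := ih
    rw [ih1]
    constructor
    · rw [roundB_fst, List.nil_append, List.filter_filter]
      apply List.filter_congr
      intro i hi
      have hr := (PySem.List.mem_pyRange_one).mp hi
      rw [okB_succ]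
      by_cases hm : ((K : Int) + 1) ≤ min i ((xs.length : Int) - i)
      · have h1 : (K : Int) ≤ min i ((xs.length : Int) - i) := by omega
        have h2 : ¬ ((K : Int) ≥ min i ((xs.length : Int) - i)) := by omega
        simp only [Nat.cast_add, Nat.cast_one] at *
        simp [h1, h2, hm, Bool.and_comm]
      · by_cases h1 : (K : Int) ≤ min i ((xs.length : Int) - i)
        · have h2 : (K : Int) ≥ min i ((xs.length : Int) - i) := by omega
          simp only [Nat.cast_add, Nat.cast_one] at *
          simp [h1, h2, hm]
        · simp only [Nat.cast_add, Nat.cast_one] at *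
          simp [h1, hm]
    · intro j
      rw [roundB_snd]
      rw [List.mem_filter]
      constructor
      · rintro (hj | ⟨⟨hjr, hcond⟩, hge⟩)
        · obtain ⟨hr, hlt, hok⟩ := ih2 j |>.mp hj
          exact ⟨hr, by push_cast; omega, hok⟩
        · have hb := (Bool.and_eq_true _ _).mp hcond
          have h1 : (K : Int) ≤ min j ((xs.length : Int) - j) := of_decide_eq_true hb.1
          have heq : min j ((xs.length : Int) - j) = (K : Int) := le_antisymm hge h1
          refine ⟨hjr, by push_cast; omega, ?_⟩
          have : (min j ((xs.length : Int) - j)).toNat = K := by omega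
          rw [this]; exact hb.2
      · rintro ⟨hr, hlt, hok⟩
        by_cases hc : min j ((xs.length : Int) - j) < (K : Int)
        · exact Or.inl ((ih2 j).mpr ⟨hr, hc, hok⟩)
        · have heq : min j ((xs.length : Int) - j) = (K : Int) := by push_cast at hlt; omega
          refine Or.inr ⟨⟨hr, ?_⟩, by omega⟩
          have hK : (min j ((xs.length : Int) - j)).toNat = K := by omega
          rw [hK] at hok
          simp [heq, hok]

-- ===== VERDICT (by name: the statement is the Claim_ definition above) =====
theorem mirrors_spec : Claim_equal_mirrors := by
  intro xs _
  unfold Spec_mirrors mirrors mirrors_alt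
  rw [PySem.List.foldl_append_if_eq_filter, List.nil_append]
  have hK : PySem.Int.floordiv (xs.length : Int) 2 + 1 = ((xs.length / 2 + 1 : Nat) : Int) := by
    rw [PySem.Int.floordiv_eq_ediv_of_pos (by norm_num)]
    omega
  simp only []
  rw [hK, PySem.List.pyRange_zero_nat, List.foldl_map]
  have hinv := stateB_inv xs (xs.length / 2 + 1)
  apply List.filter_congr
  intro i hi
  have hr := (PySem.List.mem_pyRange_one).mp hi
  have hgood : PySem.Set.contains
      (((List.range (xs.length / 2 + 1)).foldl
        (fun (st : List Int × PySem.Set Int) (s : Nat) =>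
          st.1.foldl
            (fun (st2 : List Int × PySem.Set Int) i =>
              if (s : Int) ≥ min i ((xs.length : Int) - i) then (st2.1, PySem.Set.add st2.2 i)
              else if PySem.List.pyGet? xs (i - 1 - (s : Int)) ==
                  PySem.List.pyGet? xs (i + (s : Int)) then
                (st2.1 ++ [i], st2.2)
              else st2)
            ([], st.2))
        (PySem.List.pyRange 1 (xs.length : Int) 1, PySem.Set.empty)).2) i =
      okB xs i (min i ((xs.length : Int) - i)).toNat := by
    rw [Bool.eq_iff_iff, PySem.Set.contains_iff, hinv.2 i]
    constructor
    · rintro ⟨_, _, hok⟩; exact hok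
    · intro hok
      refine ⟨hi, ?_, hok⟩
      push_cast
      omega
  rw [hgood, mirrorsLoopA_eq_all]
  have hmin : min i ((xs.length : Int) - i) = (((min i ((xs.length : Int) - i)).toNat : Nat) : Int) := by
    omega
  rw [hmin, PySem.List.pyRange_zero_nat, List.all_map]
  rfl
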